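-- pv_equiv track=rewrite | github.com/furkanaygur/Codewars-Examples | NameList.py | namelist
-- ===== SOURCE A (Python) =====
-- def namelist(names):
--     result = ''
--     a = ', '
--     if len(names) == 1:
--         return names[0]['name']
--     if len(names) == 0:
--         return ''
--     for i in range(len(names)):
--         if i == len(names)-1:
--             result = result + '& ' +str(names[i]['name'])
--             return result
--         if i == len(names) -2:
--             a = ' '
--         result = result + str(names[i]['name'])+a
-- ===== SOURCE B (Python) =====
-- def namelist(names):
--     if len(names) == 0:
--         return ''
--     if len(names) == 1:
--         return names[0]['name']
--     strs = [str(n['name']) for n in names]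
--     return ', '.join(strs[:-1]) + ' & ' + strs[-1]
-- ===== Notes on version B (the rewrite author's own statement) =====
-- stated objective: simpler
-- what changed: Replaces A's index loop with mutable separator state (switched to ' ' at the second-to-last index, '& ' prefixed at the last) by two guards plus slicing: join all but the last name with ', ' and append ' & ' + last name.
import Mathlib
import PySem

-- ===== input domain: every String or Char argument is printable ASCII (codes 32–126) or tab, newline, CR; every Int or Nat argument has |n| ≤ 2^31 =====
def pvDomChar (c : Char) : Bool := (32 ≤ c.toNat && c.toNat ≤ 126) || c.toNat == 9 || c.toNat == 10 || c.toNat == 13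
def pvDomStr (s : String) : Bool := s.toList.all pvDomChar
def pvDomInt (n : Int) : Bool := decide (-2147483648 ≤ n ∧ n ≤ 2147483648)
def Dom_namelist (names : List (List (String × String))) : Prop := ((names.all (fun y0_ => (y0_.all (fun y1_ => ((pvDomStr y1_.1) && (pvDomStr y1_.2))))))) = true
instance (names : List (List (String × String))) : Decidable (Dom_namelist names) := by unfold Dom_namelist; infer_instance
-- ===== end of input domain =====

-- B formats the list by slicing: join all but the last name with ', ' and append ' & ' + last,
-- replacing A's per-index separator-switching loop (objective: simpler; return value only, no mutation).

-- names[i]['name'] : first-match lookup of key "name"; a missing key is Python's KeyError,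
-- excluded by Pre_namelist, so the default "" is never the value being claimed.
def pvName (d : List (String × String)) : String :=
  (PySem.Dict.get? (PySem.Dict.mk d) "name").getD ""

-- ===== PORT A =====
-- the 'for i in range(len(names))' loop with state (result, a); the 'else result' arm is the
-- fall-off-the-loop case, unreachable when the loop is entered with names.length ≥ 2
def namelistLoop (names : List (List (String × String))) (i : Nat) (result a : String) : String :=
  if _h : i < names.length then
    if i = names.length - 1 then
      result ++ "& " ++ pvName (names.getD i [])
    else
      let a' := if i = names.length - 2 then " " else a
      namelistLoop names (i + 1) (result ++ pvName (names.getD i []) ++ a') a'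
  else result
termination_by names.length - i
decreasing_by omega

def namelist (names : List (List (String × String))) : String :=
  if names.length = 1 then pvName (names.getD 0 [])
  else if names.length = 0 then ""
  else namelistLoop names 0 "" ", "

-- ===== PORT B =====
def namelist_alt (names : List (List (String × String))) : String :=
  if names.length = 0 then ""
  else if names.length = 1 then pvName (names.getD 0 [])
  else
    let strs := names.map pvName
    PySem.Str.join ", " strs.dropLast ++ " & " ++ strs.getLastD ""

-- ===== PRECONDITION & SPEC =====
-- Pre_ excludes exactly the inputs where Python A raises KeyError: a dict without the key "name".
def Pre_namelist (names : List (List (String × String))) : Prop :=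
  ∀ d ∈ names, "name" ∈ d.map Prod.fst
instance (names : List (List (String × String))) : Decidable (Pre_namelist names) := by
  unfold Pre_namelist; infer_instance

def pvWitness_namelist : (List (List (String × String))) :=
  [[("name", "Alice")], [("name", "Bob")], [("name", "Carol")]]

def Spec_namelist (names : List (List (String × String))) (out : String) : Prop := out = namelist_alt names
instance (names : List (List (String × String))) (out : String) : Decidable (Spec_namelist names out) := by unfold Spec_namelist; infer_instance

-- ===== CLAIM (what is proved, stated in full; the proofs are below) =====
def Claim_equal_namelist : Prop := ∀ (names : List (List (String × String))), Dom_namelist names → Pre_namelist names → Spec_namelist names (namelist names)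

-- ===== LEMMAS AND PROOFS =====

lemma pv_join_cons_ne_nil (y : String) (ys : List String) (h : ys ≠ []) :
    PySem.Str.join ", " (y :: ys) = y ++ ", " ++ PySem.Str.join ", " ys := by
  cases ys with
  | nil => exact absurd rfl h
  | cons z zs =>
      apply String.toList_inj.mp
      simp [PySem.Str.join, PySem.Chars.join_cons_cons]

lemma pv_join_singleton (y : String) : PySem.Str.join ", " [y] = y := by
  apply String.toList_inj.mp
  simp [PySem.Str.join, PySem.Chars.join_singleton]

lemma pv_loop_eq (names : List (List (String × String))) :
    ∀ (d i : Nat) (r : String), names.length - i = d → i + 2 ≤ names.length →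
      namelistLoop names i r ", " =
        r ++ PySem.Str.join ", " (((names.map pvName).drop i).dropLast)
          ++ " & " ++ (names.map pvName).getLastD "" := by
  intro d
  induction d with
  | zero => intro i r hd h; omega
  | succ d ih =>
    intro i r hd h
    have hi : i < names.length := by omega
    have hi1 : i + 1 < names.length := by omega
    have hdropi : (names.map pvName).drop i
        = pvName names[i] :: (names.map pvName).drop (i + 1) := by
      rw [List.drop_eq_getElem_cons (by simpa using hi)]
      simp
    by_cases hlast : i + 2 = names.length
    · -- last two iterations: i = n-2 (sets a = " "), then i+1 = n-1 (returns)
      rw [namelistLoop]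
      have h2 : i = names.length - 2 := by omega
      have h1 : ¬ i = names.length - 1 := by omega
      simp only [dif_pos hi, if_neg h1, if_pos h2]
      rw [namelistLoop]
      have h1' : i + 1 = names.length - 1 := by omega
      simp only [dif_pos hi1, if_pos h1']
      have hdrop1 : (names.map pvName).drop (i + 1) = [pvName names[i + 1]] := by
        rw [List.drop_eq_getElem_cons (by simpa using hi1)]
        simp
        omega
      rw [hdropi, hdrop1]
      have hlastD : (names.map pvName).getLastD "" = pvName names[i + 1] := by
        have hlen : (names.map pvName).length = i + 2 := by simp; omega
        rw [List.getLastD_eq_getLast?, List.getLast?_eq_getElem?, hlen]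
        rw [List.getElem?_eq_getElem (by rw [hlen]; omega)]
        simp
      rw [hlastD]
      simp [List.getD, List.getElem?_eq_getElem hi, List.getElem?_eq_getElem hi1, pv_join_singleton,
        String.append_assoc]
    · -- middle iteration: separator stays ", "
      rw [namelistLoop]
      have h1 : ¬ i = names.length - 1 := by omega
      have h2 : ¬ i = names.length - 2 := by omega
      simp only [dif_pos hi, if_neg h1, if_neg h2]
      rw [ih (i + 1) _ (by omega) (by omega)]
      have hne : (names.map pvName).drop (i + 1) ≠ [] := by
        simp only [ne_eq, List.drop_eq_nil_iff]
        simp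
        omega
      have hdl : ((names.map pvName).drop i).dropLast
          = pvName names[i] :: ((names.map pvName).drop (i + 1)).dropLast := by
        rw [hdropi, List.dropLast_cons_of_ne_nil hne]
      have hdlne : ((names.map pvName).drop (i + 1)).dropLast ≠ [] := by
        intro hnil
        have := congrArg List.length hnil
        simp at this
        omega
      rw [hdl, pv_join_cons_ne_nil _ _ hdlne]
      simp [List.getD, List.getElem?_eq_getElem hi, String.append_assoc]

-- ===== VERDICT (by name: the statement is the Claim_ definition above) =====
theorem namelist_spec : Claim_equal_namelist := by
  intro names _ _
  unfold Spec_namelist namelist namelist_alt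
  by_cases h1 : names.length = 1
  · simp [h1]
  · by_cases h0 : names.length = 0
    · simp [h0]
    · have h2 : 0 + 2 ≤ names.length := by omega
      simp only [if_neg h1, if_neg h0]
      rw [pv_loop_eq names (names.length - 0) 0 "" rfl h2]
      simp [String.append_assoc]
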